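-- pv_equiv track=rewrite | github.com/DanTGL/PokemonRBYPort | tools/extract_sprite.py | delta_decode
-- ===== SOURCE A (Python) =====
-- def delta_decode(list):
--     result = []
--
--     prev_bit = False
--
--     for b in list:
--         if b == False:
--             result.append(prev_bit)
--         else:
--             prev_bit = not prev_bit
--             result.append(prev_bit)
--
--     return result
-- ===== SOURCE B (Python) =====
-- def delta_decode(list):
--     # pipeline: toggle flags -> cumulative sums -> parity as bool
--     flags = [b != False for b in list]
--     sums = []
--     s = 0
--     for f in flags:
--         s += f
--         sums.append(s)
--     return [bool(s % 2) for s in sums]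
-- ===== Notes on version B (the rewrite author's own statement) =====
-- stated objective: alternative
-- what changed: Replaces the branching running-toggle loop with a three-stage pipeline: map each element to a toggle flag, take cumulative sums, and output the parity of each prefix sum as a bool.
import Mathlib
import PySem

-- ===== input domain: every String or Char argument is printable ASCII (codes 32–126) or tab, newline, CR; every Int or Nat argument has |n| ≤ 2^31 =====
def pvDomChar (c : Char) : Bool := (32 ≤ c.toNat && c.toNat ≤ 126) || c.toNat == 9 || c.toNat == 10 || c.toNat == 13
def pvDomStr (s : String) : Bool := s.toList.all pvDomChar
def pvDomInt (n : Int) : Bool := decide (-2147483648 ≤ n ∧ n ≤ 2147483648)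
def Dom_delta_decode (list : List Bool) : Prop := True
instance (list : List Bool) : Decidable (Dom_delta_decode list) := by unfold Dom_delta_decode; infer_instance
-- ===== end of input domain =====

-- B replaces A's branching running-toggle loop by a map/cumulative-sum/parity pipeline; objective: alternative decomposition.


-- ===== PORT A =====
-- loop with state (result, prev_bit); 'b == False' on a Bool is 'b = false'
def delta_decode (list : List Bool) : List Bool :=
  (list.foldl (fun (st : List Bool × Bool) b =>
      if b == false then (st.1 ++ [st.2], st.2)
      else (st.1 ++ [!st.2], !st.2)) ([], false)).1

-- ===== PORT B =====
-- flags: 'b != False' as 0/1; cumulative-sum loop; bool(s % 2)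
def delta_decode_alt (list : List Bool) : List Bool :=
  let flags : List Int := list.map (fun b => if b != false then 1 else 0)
  let sums : List Int :=
    (flags.foldl (fun (st : List Int × Int) f => (st.1 ++ [st.2 + f], st.2 + f)) ([], 0)).1
  sums.map (fun s => s % 2 == 1)

-- ===== PRECONDITION & SPEC =====
def Spec_delta_decode (list : List Bool) (out : List Bool) : Prop := out = delta_decode_alt list
instance (list : List Bool) (out : List Bool) : Decidable (Spec_delta_decode list out) := by unfold Spec_delta_decode; infer_instance

-- ===== CLAIM (what is proved, stated in full; the proofs are below) =====
def Claim_equal_delta_decode : Prop := ∀ (list : List Bool), Dom_delta_decode list → Spec_delta_decode list (delta_decode list)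

-- ===== LEMMAS AND PROOFS =====

-- A's loop from state (r, prev) appends a block depending only on l and prev
lemma foldA_acc (l : List Bool) (r : List Bool) (prev : Bool) :
    (l.foldl (fun (st : List Bool × Bool) b =>
      if b == false then (st.1 ++ [st.2], st.2)
      else (st.1 ++ [!st.2], !st.2)) (r, prev)) =
    (r ++ (l.foldl (fun (st : List Bool × Bool) b =>
      if b == false then (st.1 ++ [st.2], st.2)
      else (st.1 ++ [!st.2], !st.2)) ([], prev)).1,
     (l.foldl (fun (st : List Bool × Bool) b =>
      if b == false then (st.1 ++ [st.2], st.2)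
      else (st.1 ++ [!st.2], !st.2)) ([], prev)).2) := by
  induction l generalizing r prev with
  | nil => simp
  | cons b bs ih =>
    cases b with
    | false =>
      simp only [List.foldl_cons, show ((false : Bool) == false) = true from rfl,
        if_true, List.nil_append]
      rw [ih (r ++ [prev]) prev, ih [prev] prev]
      simp
    | true =>
      simp only [List.foldl_cons, show ((true : Bool) == false) = false from rfl,
        Bool.false_eq_true, if_false, List.nil_append]
      rw [ih (r ++ [!prev]) (!prev), ih [!prev] (!prev)]
      simp

-- same accumulator lemma for B's cumulative-sum loop
lemma foldB_acc (fl : List Int) (r : List Int) (s : Int) :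
    (fl.foldl (fun (st : List Int × Int) f => (st.1 ++ [st.2 + f], st.2 + f)) (r, s)) =
    (r ++ (fl.foldl (fun (st : List Int × Int) f => (st.1 ++ [st.2 + f], st.2 + f)) ([], s)).1,
     (fl.foldl (fun (st : List Int × Int) f => (st.1 ++ [st.2 + f], st.2 + f)) ([], s)).2) := by
  induction fl generalizing r s with
  | nil => simp
  | cons f fs ih =>
    simp only [List.foldl_cons, List.nil_append]
    rw [ih (r ++ [s + f]) (s + f), ih [s + f] (s + f)]
    simp

-- core: A from prev and B's pipeline from a sum s with parity prev agree
lemma core (l : List Bool) (prev : Bool) (s : Int) (hs : prev = (s % 2 == 1)) (h0 : 0 ≤ s) :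
    (l.foldl (fun (st : List Bool × Bool) b =>
      if b == false then (st.1 ++ [st.2], st.2)
      else (st.1 ++ [!st.2], !st.2)) ([], prev)).1 =
    ((l.map (fun b => if b != false then (1 : Int) else 0)).foldl
      (fun (st : List Int × Int) f => (st.1 ++ [st.2 + f], st.2 + f)) ([], s)).1.map
      (fun t => t % 2 == 1) := by
  induction l generalizing prev s with
  | nil => simp
  | cons b bs ih =>
    cases b with
    | false =>
      simp only [List.map_cons, List.foldl_cons]
      simp only [show (false == false) = true from rfl, show ((false : Bool) != false) = false from rfl,
        Bool.false_eq_true, if_false, if_true, List.nil_append]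
      rw [foldA_acc bs [prev] prev, foldB_acc _ [s + 0] (s + 0)]
      simp only [List.map_append, List.map_cons, List.map_nil]
      rw [ih prev (s + 0) (by simpa using hs) (by omega)]
      simp [hs]
    | true =>
      simp only [List.map_cons, List.foldl_cons]
      simp only [show (true == false) = false from rfl, show ((true : Bool) != false) = true from rfl,
        Bool.false_eq_true, if_false, if_true, List.nil_append]
      rw [foldA_acc bs [!prev] (!prev), foldB_acc _ [s + 1] (s + 1)]
      simp only [List.map_append, List.map_cons, List.map_nil]
      rw [ih (!prev) (s + 1) ?_ (by omega)]
      · congr 1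
        congr 1
        subst hs
        rcases Int.emod_two_eq_zero_or_one s with h | h <;> rw [Int.add_emod, h] <;> decide
      · subst hs
        rcases Int.emod_two_eq_zero_or_one s with h | h <;> rw [Int.add_emod, h] <;> decide

-- ===== VERDICT (by name: the statement is the Claim_ definition above) =====
theorem delta_decode_spec : Claim_equal_delta_decode := by
  intro l _
  unfold Spec_delta_decode delta_decode delta_decode_alt
  exact core l false 0 (by decide) (by decide)
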